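-- pv_equiv track=rewrite | github.com/dmzubr/vadnet | vad_joint.py | convert_vad_nn_bool_result
-- ===== SOURCE A (Python) =====
-- def convert_vad_nn_bool_result(timestamps_boolean: list):
--     """
--     Converts the VAD result of neural network to the form of the result webrtc VAD
--     """
--     time_timestamps = []
--     cur_segm = []
--     for i in range(len(timestamps_boolean)):
--         if timestamps_boolean[i]:
--             if len(cur_segm) == 0:
--                 cur_segm.append(i)
--         else:
--             if len(cur_segm) > 0:
--                 cur_segm.append(i)
--                 time_timestamps.append(cur_segm)
--                 cur_segm = []
--
--     # If last bool el will be equal to zero - then need to finish last segment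
--     if len(cur_segm) > 0:
--         cur_segm.append(len(timestamps_boolean))
--         time_timestamps.append(cur_segm)
--
--     return time_timestamps
-- ===== SOURCE B (Python) =====
-- def convert_vad_nn_bool_result(timestamps_boolean: list):
--     """Run-grouping re-implementation: scan each maximal run of equal truth
--     values at once; a truthy run [i, j) becomes the segment [i, j]."""
--     res = []
--     n = len(timestamps_boolean)
--     i = 0
--     while i < n:
--         j = i + 1
--         while j < n and bool(timestamps_boolean[j]) == bool(timestamps_boolean[i]):
--             j += 1
--         if timestamps_boolean[i]:
--             res.append([i, j])
--         i = j
--     return res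
-- ===== Notes on version B (the rewrite author's own statement) =====
-- stated objective: alternative
-- what changed: Replaces A's per-element state machine (cur_segm accumulator holding a pending start) with a run-grouping scan: each maximal run of equal truth values is consumed at once and a truthy run [i,j) directly yields the segment [i,j].
import Mathlib
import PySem

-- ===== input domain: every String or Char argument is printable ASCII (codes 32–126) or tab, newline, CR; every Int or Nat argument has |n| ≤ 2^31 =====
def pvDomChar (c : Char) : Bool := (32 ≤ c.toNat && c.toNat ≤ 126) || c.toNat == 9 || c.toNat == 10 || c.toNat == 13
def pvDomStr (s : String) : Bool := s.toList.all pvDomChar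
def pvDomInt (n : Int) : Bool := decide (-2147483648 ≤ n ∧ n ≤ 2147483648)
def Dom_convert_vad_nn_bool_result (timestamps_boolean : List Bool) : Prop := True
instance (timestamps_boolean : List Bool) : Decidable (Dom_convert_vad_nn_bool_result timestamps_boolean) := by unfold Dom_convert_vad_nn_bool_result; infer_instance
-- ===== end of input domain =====

-- B replaces A's per-element pending-segment state machine by a run-grouping scan (alternative decomposition, same cost).

-- ===== PORT A =====
-- one loop-body step of A; indices come from range(len(ts)) so ts[i] is always
-- in range and List.getD i false is exact there
def stepA (ts : List Bool) (acc : List (List Int) × List Int) (i : Nat) :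
    List (List Int) × List Int :=
  if ts.getD i false then
    if acc.2.length = 0 then (acc.1, acc.2 ++ [(i : Int)]) else acc
  else
    if acc.2.length > 0 then (acc.1 ++ [acc.2 ++ [(i : Int)]], []) else acc

def convert_vad_nn_bool_result (timestamps_boolean : List Bool) : List (List Int) :=
  let st := (List.range timestamps_boolean.length).foldl (stepA timestamps_boolean) ([], [])
  if st.2.length > 0 then st.1 ++ [st.2 ++ [(timestamps_boolean.length : Int)]] else st.1

-- ===== PORT B =====
-- length of the inner `while` run scan of Source B: how many leading elements of l equal v
def runLenAlt : List Bool → Bool → Nat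
  | [], _ => 0
  | x :: xs, v => if x == v then 1 + runLenAlt xs v else 0

-- outer `while i < n` loop of Source B: consume one maximal run per step
def goAlt : List Bool → Nat → List (List Int)
  | [], _ => []
  | x :: xs, i =>
    let L := 1 + runLenAlt xs x
    let rest := goAlt (xs.drop (runLenAlt xs x)) (i + L)
    if x then [(i : Int), ((i + L : Nat) : Int)] :: rest else rest
  termination_by l _ => l.length
  decreasing_by simp only [List.length_drop, List.length_cons]; omega

def convert_vad_nn_bool_result_alt (timestamps_boolean : List Bool) : List (List Int) :=
  goAlt timestamps_boolean 0

-- ===== PRECONDITION & SPEC =====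
def Spec_convert_vad_nn_bool_result (timestamps_boolean : List Bool) (out : List (List Int)) : Prop := out = convert_vad_nn_bool_result_alt timestamps_boolean
instance (timestamps_boolean : List Bool) (out : List (List Int)) : Decidable (Spec_convert_vad_nn_bool_result timestamps_boolean out) := by unfold Spec_convert_vad_nn_bool_result; infer_instance

-- ===== CLAIM (what is proved, stated in full; the proofs are below) =====
def Claim_equal_convert_vad_nn_bool_result : Prop := ∀ (timestamps_boolean : List Bool), Dom_convert_vad_nn_bool_result timestamps_boolean → Spec_convert_vad_nn_bool_result timestamps_boolean (convert_vad_nn_bool_result timestamps_boolean)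

-- ===== LEMMAS AND PROOFS =====

-- recursive form of A's loop: list suffix, current index, accumulated (time_timestamps, cur_segm)
def loopA : List Bool → Nat → List (List Int) → List Int → List (List Int) × List Int
  | [], _, tt, cs => (tt, cs)
  | x :: xs, i, tt, cs =>
    if x then
      if cs.length = 0 then loopA xs (i+1) tt (cs ++ [(i : Int)]) else loopA xs (i+1) tt cs
    else
      if cs.length > 0 then loopA xs (i+1) (tt ++ [cs ++ [(i : Int)]]) [] else loopA xs (i+1) tt cs

-- A's final flush after the loop
def finA (st : List (List Int) × List Int) (n : Nat) : List (List Int) :=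
  if st.2.length > 0 then st.1 ++ [st.2 ++ [(n : Int)]] else st.1

lemma bridge (full : List Bool) : ∀ (l : List Bool) (k : Nat)
    (acc : List (List Int) × List Int), full.drop k = l →
    (List.range' k l.length).foldl (stepA full) acc = loopA l k acc.1 acc.2 := by
  intro l
  induction l with
  | nil => intro k acc _; simp [loopA]
  | cons x xs ih =>
    intro k acc h
    have h0 : full[k]? = some x := by
      have h2 : (List.drop k full)[0]? = full[k + 0]? := List.getElem?_drop
      rw [h] at h2
      simpa using h2.symm
    have hdrop : full.drop (k+1) = xs := by
      have h3 : (full.drop k).drop 1 = xs := by simp [h]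
      simpa [List.drop_drop] using h3
    simp only [List.length_cons, List.range'_succ, List.foldl_cons]
    rw [ih (k+1) (stepA full acc k) hdrop]
    cases x
    · by_cases hcs : 0 < acc.2.length <;>
        simp [stepA, loopA, List.getD_eq_getElem?_getD, h0, hcs]
    · by_cases hcs : acc.2.length = 0 <;>
        simp [stepA, loopA, List.getD_eq_getElem?_getD, h0, hcs]

lemma goAlt_false (xs : List Bool) (i : Nat) : goAlt (false :: xs) i = goAlt xs (i+1) := by
  cases xs with
  | nil => simp [goAlt, runLenAlt]
  | cons y ys =>
    cases y
    · simp only [goAlt, runLenAlt]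
      norm_num
      rw [show 1 + runLenAlt ys false = runLenAlt ys false + 1 from by omega,
        List.drop_succ_cons]
      ring_nf
    · simp [goAlt, runLenAlt]

lemma goAlt_true (xs : List Bool) (i : Nat) :
    goAlt (true :: xs) i
      = [(i : Int), ((i + 1 + runLenAlt xs true : Nat) : Int)]
          :: goAlt (xs.drop (runLenAlt xs true)) (i + 1 + runLenAlt xs true) := by
  simp only [goAlt]
  simp [show i + (1 + runLenAlt xs true) = i + 1 + runLenAlt xs true from by omega]

lemma main (l : List Bool) :
    (∀ i tt, finA (loopA l i tt []) (i + l.length) = tt ++ goAlt l i) ∧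
    (∀ i tt (s : Int), finA (loopA l i tt [s]) (i + l.length) =
      tt ++ [[s, ((i + runLenAlt l true : Nat) : Int)]]
         ++ goAlt (l.drop (runLenAlt l true)) (i + runLenAlt l true)) := by
  induction l with
  | nil =>
    constructor
    · intro i tt; simp [loopA, finA, goAlt]
    · intro i tt s; simp [loopA, finA, runLenAlt, goAlt]
  | cons x xs ih =>
    obtain ⟨ihP, ihQ⟩ := ih
    constructor
    · intro i tt
      cases x
      · -- false, cur_segm empty: skip the element
        have hstep : loopA (false :: xs) i tt [] = loopA xs (i+1) tt [] := by
          simp [loopA]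
        rw [hstep, show i + (false :: xs).length = (i+1) + xs.length from by
          simp; omega]
        rw [ihP (i+1) tt, goAlt_false]
      · -- true, open a segment at i
        have hstep : loopA (true :: xs) i tt [] = loopA xs (i+1) tt [(i : Int)] := by
          simp [loopA]
        rw [hstep, show i + (true :: xs).length = (i+1) + xs.length from by
          simp; omega]
        rw [ihQ (i+1) tt (i : Int), goAlt_true]
        simp [List.append_assoc]
    · intro i tt s
      cases x
      · -- false closes the open segment at index i
        have hstep : loopA (false :: xs) i tt [s]
            = loopA xs (i+1) (tt ++ [[s, (i : Int)]]) [] := by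
          simp [loopA]
        rw [hstep, show i + (false :: xs).length = (i+1) + xs.length from by
          simp; omega]
        rw [ihP (i+1) (tt ++ [[s, (i : Int)]])]
        have hr0 : runLenAlt (false :: xs) true = 0 := by simp [runLenAlt]
        rw [hr0]
        simp [goAlt_false, List.append_assoc]
      · -- true continues the open segment
        have hstep : loopA (true :: xs) i tt [s] = loopA xs (i+1) tt [s] := by
          simp [loopA]
        rw [hstep, show i + (true :: xs).length = (i+1) + xs.length from by
          simp; omega]
        rw [ihQ (i+1) tt s]
        have hr : runLenAlt (true :: xs) true = runLenAlt xs true + 1 := by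
          simp [runLenAlt]; omega
        rw [hr, List.drop_succ_cons,
          show i + (runLenAlt xs true + 1) = i + 1 + runLenAlt xs true from by omega]

-- ===== VERDICT (by name: the statement is the Claim_ definition above) =====
theorem convert_vad_nn_bool_result_spec : Claim_equal_convert_vad_nn_bool_result := by
  intro ts _
  show convert_vad_nn_bool_result ts = convert_vad_nn_bool_result_alt ts
  have hb := bridge ts ts 0 ([], []) (by simp)
  have hm := (main ts).1 0 []
  simp only [Nat.zero_add, List.nil_append] at hm
  calc convert_vad_nn_bool_result ts
      = finA ((List.range' 0 ts.length).foldl (stepA ts) ([], [])) ts.length := by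
        simp [convert_vad_nn_bool_result, finA, List.range_eq_range']
    _ = finA (loopA ts 0 [] []) ts.length := by rw [hb]
    _ = goAlt ts 0 := hm
    _ = convert_vad_nn_bool_result_alt ts := rfl
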